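-- pv_equiv track=rewrite | github.com/Nabeel-KM/wfh_monitoring_with_dockerfiles | backend/app/utils/helpers.py | normalize_app_names
-- ===== SOURCE A (Python) =====
-- from typing import Dict, Any, Optional
--
-- def normalize_app_names(app_usage: Dict[str, int]) -> Dict[str, int]:
--     """Normalize application names for consistent display"""
--     normalized = {}
--     browser_names = {
--         'chrome': 'Google Chrome',
--         'google-chrome': 'Google Chrome',
--         'google chrome': 'Google Chrome',
--         'chromium': 'Google Chrome',
--         'chromium-browser': 'Google Chrome',
--         'firefox': 'Firefox',
--         'mozilla firefox': 'Firefox',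
--         'mozilla-firefox': 'Firefox',
--         'safari': 'Safari',
--         'microsoft-edge': 'Microsoft Edge',
--         'msedge': 'Microsoft Edge',
--         'edge': 'Microsoft Edge',
--         'brave': 'Brave',
--         'brave-browser': 'Brave',
--         'opera': 'Opera',
--         'opera-browser': 'Opera',
--         'vivaldi': 'Vivaldi',
--         'vivaldi-browser': 'Vivaldi'
--     }
--
--     for app, time in app_usage.items():
--         # Convert to lowercase for case-insensitive matching
--         app_lower = app.lower()
--
--         # Check if it's a browser
--         if app_lower in browser_names:
--             normalized_name = browser_names[app_lower]
--         else:
--             # For non-browser apps, just capitalize each word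
--             normalized_name = ' '.join(word.capitalize() for word in app.split())
--
--         # Add to normalized dict, combining times for same normalized names
--         if normalized_name in normalized:
--             normalized[normalized_name] += time
--         else:
--             normalized[normalized_name] = time
--
--     return normalized
-- ===== SOURCE B (Python) =====
-- BROWSER_NAMES = {
--     'chrome': 'Google Chrome',
--     'google-chrome': 'Google Chrome',
--     'google chrome': 'Google Chrome',
--     'chromium': 'Google Chrome',
--     'chromium-browser': 'Google Chrome',
--     'firefox': 'Firefox',
--     'mozilla firefox': 'Firefox',
--     'mozilla-firefox': 'Firefox',
--     'safari': 'Safari',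
--     'microsoft-edge': 'Microsoft Edge',
--     'msedge': 'Microsoft Edge',
--     'edge': 'Microsoft Edge',
--     'brave': 'Brave',
--     'brave-browser': 'Brave',
--     'opera': 'Opera',
--     'opera-browser': 'Opera',
--     'vivaldi': 'Vivaldi',
--     'vivaldi-browser': 'Vivaldi',
-- }
--
--
-- def _display_name(app):
--     return BROWSER_NAMES.get(app.lower()) or ' '.join(w.capitalize() for w in app.split())
--
--
-- def normalize_app_names(app_usage):
--     """Normalize application names for consistent display."""
--     pairs = [(_display_name(app), t) for app, t in app_usage.items()]
--     result = {}
--     while pairs: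
--         name = pairs[0][0]
--         result[name] = sum(t for n, t in pairs if n == name)
--         pairs = [(n, t) for n, t in pairs if n != name]
--     return result
-- ===== Notes on version B (the rewrite author's own statement) =====
-- stated objective: alternative
-- what changed: A accumulates sums into a dict during one pass; B first normalizes every name into a (name, time) list and then repeatedly groups: take the first remaining name, sum all of its entries in one scan, remove them, and continue on the leftover list; B's name helper also uses dict.get-with-or instead of A's membership-test branch.
import Mathlib
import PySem

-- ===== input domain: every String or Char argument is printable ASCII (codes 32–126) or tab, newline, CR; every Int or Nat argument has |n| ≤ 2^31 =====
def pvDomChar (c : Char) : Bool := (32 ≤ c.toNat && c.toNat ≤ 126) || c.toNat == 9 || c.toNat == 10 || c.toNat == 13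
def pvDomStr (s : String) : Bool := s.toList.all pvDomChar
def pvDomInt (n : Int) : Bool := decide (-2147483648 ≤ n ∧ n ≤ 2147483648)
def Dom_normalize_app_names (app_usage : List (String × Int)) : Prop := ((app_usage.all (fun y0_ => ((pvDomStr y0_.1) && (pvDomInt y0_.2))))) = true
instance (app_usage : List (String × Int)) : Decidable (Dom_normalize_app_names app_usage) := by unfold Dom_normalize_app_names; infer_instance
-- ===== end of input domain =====

-- B replaces A's one-pass dict accumulation by repeated grouping: take the first remaining
-- normalized name, sum all its entries, drop them, repeat (objective: alternative, same results).

-- ===== PORT A =====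
-- the browser_names dict literal of A
def pvBrowserNames : PySem.Dict String String := PySem.Dict.ofList [
  ("chrome", "Google Chrome"),
  ("google-chrome", "Google Chrome"),
  ("google chrome", "Google Chrome"),
  ("chromium", "Google Chrome"),
  ("chromium-browser", "Google Chrome"),
  ("firefox", "Firefox"),
  ("mozilla firefox", "Firefox"),
  ("mozilla-firefox", "Firefox"),
  ("safari", "Safari"),
  ("microsoft-edge", "Microsoft Edge"),
  ("msedge", "Microsoft Edge"),
  ("edge", "Microsoft Edge"),
  ("brave", "Brave"),
  ("brave-browser", "Brave"),
  ("opera", "Opera"),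
  ("opera-browser", "Opera"),
  ("vivaldi", "Vivaldi"),
  ("vivaldi-browser", "Vivaldi")]

-- word.capitalize() for a word produced by str.split(): exact on the ASCII domain
def pvCapWord (w : List Char) : List Char :=
  match w with
  | [] => []
  | c :: rest => PySem.Chars.upperChar c :: PySem.Chars.lower rest

-- A's in-loop normalization: lowercase browser lookup, else capitalize each word
def pvNormName (app : String) : String :=
  let app_lower := PySem.Str.lower app
  match pvBrowserNames.get? app_lower with
  | some n => n
  | none => String.ofList (PySem.Chars.join [' '] ((PySem.Chars.split₀ app.toList).map pvCapWord))

def normalize_app_names (app_usage : List (String × Int)) : List (String × Int) :=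
  ((PySem.Dict.ofList app_usage).items.foldl
    (fun (normalized : PySem.Dict String Int) p =>
      let normalized_name := pvNormName p.1
      if normalized.contains normalized_name then
        normalized.modify normalized_name 0 (· + p.2)
      else
        normalized.insert normalized_name p.2)
    PySem.Dict.empty).items

-- ===== PORT B =====
-- B's module-level BROWSER_NAMES literal, kept as the plain pair list it is written as
def pvBrowserList : List (String × String) := [
  ("chrome", "Google Chrome"),
  ("google-chrome", "Google Chrome"),
  ("google chrome", "Google Chrome"),
  ("chromium", "Google Chrome"),
  ("chromium-browser", "Google Chrome"),
  ("firefox", "Firefox"),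
  ("mozilla firefox", "Firefox"),
  ("mozilla-firefox", "Firefox"),
  ("safari", "Safari"),
  ("microsoft-edge", "Microsoft Edge"),
  ("msedge", "Microsoft Edge"),
  ("edge", "Microsoft Edge"),
  ("brave", "Brave"),
  ("brave-browser", "Brave"),
  ("opera", "Opera"),
  ("opera-browser", "Opera"),
  ("vivaldi", "Vivaldi"),
  ("vivaldi-browser", "Vivaldi")]

-- _display_name: BROWSER_NAMES.get(app.lower()) or ' '.join(w.capitalize() for w in app.split())
-- (the stored browser names are non-empty, so Python's 'or' is exactly getD of the lookup)
def pvDisplayName (app : String) : String :=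
  ((pvBrowserList.find? (fun kv => kv.1 == PySem.Str.lower app)).map Prod.snd).getD
    (String.ofList (PySem.Chars.join [' ']
      ((PySem.Chars.split₀ app.toList).map
        (fun w => match w with
          | [] => []
          | c :: cs => PySem.Chars.upperChar c :: PySem.Chars.lower cs))))

-- the while loop: emit the first remaining name with the total of all its entries,
-- drop those entries, continue on the rest
def pvGroupFirst : List (String × Int) → List (String × Int)
  | [] => []
  | (name, t) :: rest =>
      (name, ((((name, t) :: rest).filter (fun p => p.1 == name)).map (fun p => p.2)).sum) ::
        pvGroupFirst (((name, t) :: rest).filter (fun p => !(p.1 == name)))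
termination_by pairs => pairs.length
decreasing_by
  simp only [List.filter_cons, beq_self_eq_true, Bool.not_true, Bool.false_eq_true,
    if_false, List.length_cons]
  exact Nat.lt_succ_of_le (List.length_filter_le _ _)

def normalize_app_names_alt (app_usage : List (String × Int)) : List (String × Int) :=
  pvGroupFirst ((PySem.Dict.ofList app_usage).items.map (fun p => (pvDisplayName p.1, p.2)))

-- ===== PRECONDITION & SPEC =====
def Spec_normalize_app_names (app_usage : List (String × Int)) (out : List (String × Int)) : Prop := out = normalize_app_names_alt app_usage
instance (app_usage : List (String × Int)) (out : List (String × Int)) : Decidable (Spec_normalize_app_names app_usage out) := by unfold Spec_normalize_app_names; infer_instance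

-- ===== CLAIM (what is proved, stated in full; the proofs are below) =====
def Claim_equal_normalize_app_names : Prop := ∀ (app_usage : List (String × Int)), Dom_normalize_app_names app_usage → Spec_normalize_app_names app_usage (normalize_app_names app_usage)

-- ===== LEMMAS AND PROOFS =====

-- the two normalization helpers agree
lemma pvDisplayName_eq (app : String) : pvDisplayName app = pvNormName app := by
  have hitems : pvBrowserNames.items = pvBrowserList := by decide
  have hget : ∀ k : String, pvBrowserNames.get? k = (pvBrowserList.find? (fun kv => kv.1 == k)).map Prod.snd := by
    intro k
    rw [show pvBrowserNames.get? k = (pvBrowserNames.items.find? (fun kv => kv.1 == k)).map Prod.snd from rfl, hitems]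
  unfold pvDisplayName pvNormName
  simp only [hget]
  cases hfind : pvBrowserList.find? (fun kv => kv.1 == PySem.Str.lower app) with
  | none => rfl
  | some kv => rfl

-- A's loop body, with the name already normalized
def pvStep (d : PySem.Dict String Int) (p : String × Int) : PySem.Dict String Int :=
  if d.contains p.1 then d.modify p.1 0 (· + p.2) else d.insert p.1 p.2

-- first-appearance key order of a pair list
def pvOrdF (acc : List String) (p : String × Int) : List String :=
  if p.1 ∈ acc then acc else acc ++ [p.1]

def pvOrd (qs : List (String × Int)) : List String := qs.foldl pvOrdF []

-- the output row for key n
def pvRow (qs : List (String × Int)) (n : String) : String × Int :=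
  (n, ((qs.filter (fun p => p.1 == n)).map (fun p => p.2)).sum)

def pvOut (qs : List (String × Int)) : List (String × Int) := (pvOrd qs).map (pvRow qs)

lemma pvOrd_append (qs : List (String × Int)) (p : String × Int) :
    pvOrd (qs ++ [p]) = if p.1 ∈ pvOrd qs then pvOrd qs else pvOrd qs ++ [p.1] := by
  simp [pvOrd, pvOrdF, List.foldl_append]

lemma pvOrd_mem (qs : List (String × Int)) (x : String) :
    x ∈ pvOrd qs ↔ x ∈ qs.map Prod.fst := by
  have h : ∀ (l : List (String × Int)) (acc : List String) (x : String),
      x ∈ l.foldl pvOrdF acc ↔ x ∈ acc ∨ x ∈ l.map Prod.fst := by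
    intro l
    induction l with
    | nil => simp
    | cons q l ih =>
      intro acc x
      simp only [List.foldl_cons, List.map_cons, List.mem_cons, pvOrdF]
      by_cases hq : q.1 ∈ acc
      · rw [if_pos hq, ih]
        constructor
        · tauto
        · rintro (h1 | h1 | h1)
          · tauto
          · subst h1; tauto
          · tauto
      · rw [if_neg hq, ih]
        simp only [List.mem_append, List.mem_singleton]
        tauto
  simpa [pvOrd] using h qs [] x

lemma pvFind_map (l : List String) (g : String → String × Int) (n : String)
    (hg : ∀ m, (g m).1 = m) (hn : n ∈ l) :
    (l.map g).find? (fun p => p.1 == n) = some (g n) := by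
  induction l with
  | nil => simp at hn
  | cons m l ih =>
    by_cases hm : m = n
    · subst hm; simp [hg]
    · have hn' : n ∈ l := by
        cases hn with
        | head => exact absurd rfl hm
        | tail _ h => exact h
      simp [hg, hm, ih hn']

lemma pvRow_append (qs : List (String × Int)) (p : String × Int) (m : String) :
    pvRow (qs ++ [p]) m = (m, (pvRow qs m).2 + if p.1 == m then p.2 else 0) := by
  by_cases h : p.1 = m <;> simp [pvRow, List.filter_append, h]

-- A's accumulation equals the first-appearance-order / per-key-sum table
lemma pvMain (qs : List (String × Int)) :
    (qs.foldl pvStep PySem.Dict.empty).items = pvOut qs := by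
  induction qs using List.reverseRecOn with
  | nil => rfl
  | append_singleton qs p ih =>
    rw [List.foldl_append, List.foldl_cons, List.foldl_nil]
    have hd : qs.foldl pvStep PySem.Dict.empty = PySem.Dict.mk (pvOut qs) :=
      PySem.Dict.ext ih
    rw [hd]
    by_cases hmem : p.1 ∈ pvOrd qs
    · have hcont : (PySem.Dict.mk (pvOut qs)).contains p.1 = true := by
        simp only [PySem.Dict.contains, List.any_eq_true, pvOut]
        exact ⟨pvRow qs p.1, List.mem_map_of_mem hmem, by simp [pvRow]⟩
      have hfind : (pvOut qs).find? (fun q => q.1 == p.1) = some (pvRow qs p.1) :=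
        pvFind_map _ _ _ (fun m => rfl) hmem
      simp only [pvStep, hcont, if_true, PySem.Dict.modify, PySem.Dict.getD,
        PySem.Dict.get?, PySem.Dict.insert, hfind, Option.map_some,
        Option.getD_some]
      rw [show pvOut (qs ++ [p]) = (pvOrd qs).map (pvRow (qs ++ [p])) by
        rw [pvOut, pvOrd_append, if_pos hmem]]
      rw [pvOut, List.map_map]
      apply List.map_congr_left
      intro m hm
      by_cases h : m = p.1
      · subst h
        simp [Function.comp, pvRow]
      · have h' : ¬ (p.1 = m) := fun hh => h hh.symm
        simp [Function.comp, pvRow, h, h']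
    · have hcont : (PySem.Dict.mk (pvOut qs)).contains p.1 = false := by
        simp only [PySem.Dict.contains, List.any_eq_false, pvOut]
        intro q hq
        obtain ⟨m, hm, rfl⟩ := List.mem_map.mp hq
        simp only [pvRow, beq_iff_eq]
        exact fun hh => hmem (hh ▸ hm)
      simp only [pvStep, hcont, Bool.false_eq_true, if_false, PySem.Dict.insert]
      rw [show pvOut (qs ++ [p]) = (pvOrd qs).map (pvRow (qs ++ [p])) ++ [pvRow (qs ++ [p]) p.1] by
        rw [pvOut, pvOrd_append, if_neg hmem, List.map_append, List.map_singleton]]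
      congr 1
      · rw [pvOut]
        apply List.map_congr_left
        intro m hm
        have hne : ¬ (p.1 = m) := fun hh => hmem (hh ▸ hm)
        rw [pvRow_append]
        simp [pvRow, hne]
      · have hfil : qs.filter (fun q => q.1 == p.1) = [] := by
          rw [List.filter_eq_nil_iff]
          intro q hq
          simp only [beq_iff_eq]
          exact fun hh => hmem ((pvOrd_mem qs p.1).mpr (hh ▸ List.mem_map_of_mem hq))
        rw [pvRow_append]
        simp [pvRow, hfil]

-- first-appearance order with an accumulator of already-seen names
lemma pvOrd_acc (N : Nat) : ∀ (l : List (String × Int)), l.length ≤ N → ∀ (acc : List String),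
    l.foldl pvOrdF acc = acc ++ pvOrd (l.filter (fun p => !(decide (p.1 ∈ acc)))) := by
  induction N with
  | zero =>
    intro l hl acc
    cases l with
    | nil => simp [pvOrd]
    | cons a t => simp at hl
  | succ N ih =>
    intro l hl acc
    match l with
    | [] => simp [pvOrd]
    | q :: l' =>
      simp only [List.length_cons] at hl
      simp only [List.foldl_cons, List.filter_cons]
      by_cases hq : q.1 ∈ acc
      · rw [show pvOrdF acc q = acc from if_pos hq, ih l' (by omega) acc]
        simp [hq]
      · rw [show pvOrdF acc q = acc ++ [q.1] from if_neg hq,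
          ih l' (by omega) (acc ++ [q.1])]
        have hkeep : (!(decide (q.1 ∈ acc))) = true := by simp [hq]
        rw [if_pos hkeep]
        have hX := ih (l'.filter (fun p => !(decide (p.1 ∈ acc))))
          (le_trans (List.length_filter_le _ _) (by omega)) [q.1]
        have hpv : pvOrd (q :: l'.filter (fun p => !(decide (p.1 ∈ acc)))) =
            [q.1] ++ pvOrd ((l'.filter (fun p => !(decide (p.1 ∈ acc)))).filter
              (fun p => !(decide (p.1 ∈ ([q.1] : List String))))) := by
          rw [pvOrd, List.foldl_cons, show pvOrdF [] q = [q.1] by simp [pvOrdF]]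
          exact hX
        have hpred : ∀ p : String × Int,
            ((!(decide (p.1 ∈ ([q.1] : List String)))) && (!(decide (p.1 ∈ acc)))) =
              (!(decide (p.1 ∈ acc ++ [q.1]))) := by
          intro p
          by_cases h1 : p.1 = q.1 <;> by_cases h2 : p.1 ∈ acc <;>
            simp [h1, h2, List.mem_append]
        rw [hpv, List.filter_filter, List.filter_congr (fun p _ => hpred p),
          List.append_assoc]

lemma pvOrd_cons (q : String × Int) (l : List (String × Int)) :
    pvOrd (q :: l) = q.1 :: pvOrd (l.filter (fun p => !(p.1 == q.1))) := by
  rw [pvOrd, List.foldl_cons, show pvOrdF [] q = [q.1] by simp [pvOrdF],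
    pvOrd_acc l.length l le_rfl [q.1]]
  have hfc : l.filter (fun p => !(decide (p.1 ∈ ([q.1] : List String)))) =
      l.filter (fun p => !(p.1 == q.1)) :=
    List.filter_congr (fun p _ => by by_cases h : p.1 = q.1 <;> simp [h])
  rw [hfc]
  rfl

lemma pvOut_cons (q : String × Int) (l : List (String × Int)) :
    pvOut (q :: l) = (q.1, q.2 + ((l.filter (fun p => p.1 == q.1)).map (fun p => p.2)).sum) ::
      pvOut (l.filter (fun p => !(p.1 == q.1))) := by
  rw [pvOut, pvOrd_cons, List.map_cons]
  congr 1
  · simp [pvRow]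
  · rw [pvOut]
    apply List.map_congr_left
    intro m hm
    have hmmem := (pvOrd_mem _ m).mp hm
    obtain ⟨p, hp, rfl⟩ := List.mem_map.mp hmmem
    have hne : ¬ (p.1 = q.1) := by simpa using (List.mem_filter.mp hp).2
    have hff : (l.filter (fun r => !(r.1 == q.1))).filter (fun r => r.1 == p.1) =
        l.filter (fun r => r.1 == p.1) := by
      rw [List.filter_filter]
      apply List.filter_congr
      intro r _
      by_cases h : r.1 = p.1 <;> simp [h, hne]
    have hne' : (q.1 == p.1) = false := by simpa using fun h => hne h.symm
    simp [pvRow, hne', hff]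

-- B's grouping loop computes the same table
lemma pvGroupFirst_eq_pvOut (qs : List (String × Int)) : pvGroupFirst qs = pvOut qs := by
  induction qs using pvGroupFirst.induct with
  | case1 => simp [pvGroupFirst, pvOut, pvOrd]
  | case2 name t rest ih =>
    rw [pvGroupFirst, pvOut_cons]
    simp only [List.filter_cons, beq_self_eq_true, Bool.not_true, Bool.false_eq_true,
      if_false, if_true, List.map_cons, List.sum_cons] at ih ⊢
    rw [ih]

-- ===== VERDICT (by name: the statement is the Claim_ definition above) =====
theorem normalize_app_names_spec : Claim_equal_normalize_app_names := by
  intro app_usage _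
  unfold Spec_normalize_app_names normalize_app_names normalize_app_names_alt
  have h : ((PySem.Dict.ofList app_usage).items.foldl
      (fun (normalized : PySem.Dict String Int) p =>
        let normalized_name := pvNormName p.1
        if normalized.contains normalized_name then
          normalized.modify normalized_name 0 (· + p.2)
        else
          normalized.insert normalized_name p.2)
      PySem.Dict.empty)
      = (((PySem.Dict.ofList app_usage).items.map (fun p => (pvNormName p.1, p.2))).foldl
          pvStep PySem.Dict.empty) := by
    rw [List.foldl_map]
    rfl
  rw [h, pvMain, pvGroupFirst_eq_pvOut]
  congr 1
  apply List.map_congr_left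
  intro p _
  rw [pvDisplayName_eq]
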